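-- pv_equiv track=rewrite | github.com/MichBurl/prac.pr1 | 04-Subroutines/29.py | f
-- ===== SOURCE A (Python) =====
-- def f(dice):
--     #lista=list(dice)
--     liczby=[]
--     ilosc=0
--     for i in range(len(dice)):
--         ilosc = dice.count(str(i))
--         liczby.append(ilosc)
--     for i in range(len(liczby)):
--         if liczby[i]==max(liczby):
--             return i
-- ===== SOURCE B (Python) =====
-- def f(dice):
--     best_index = None
--     best_count = 0
--     for i in range(len(dice)):
--         c = dice.count(str(i))
--         if best_index is None or c > best_count:
--             best_index, best_count = i, c
--     return best_index
-- ===== Notes on version B (the rewrite author's own statement) =====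
-- stated objective: simpler
-- what changed: Replaces A's materialized counts list plus a second scan that recomputes max() at every step with a single online argmax pass keeping only best_index/best_count.
import Mathlib
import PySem

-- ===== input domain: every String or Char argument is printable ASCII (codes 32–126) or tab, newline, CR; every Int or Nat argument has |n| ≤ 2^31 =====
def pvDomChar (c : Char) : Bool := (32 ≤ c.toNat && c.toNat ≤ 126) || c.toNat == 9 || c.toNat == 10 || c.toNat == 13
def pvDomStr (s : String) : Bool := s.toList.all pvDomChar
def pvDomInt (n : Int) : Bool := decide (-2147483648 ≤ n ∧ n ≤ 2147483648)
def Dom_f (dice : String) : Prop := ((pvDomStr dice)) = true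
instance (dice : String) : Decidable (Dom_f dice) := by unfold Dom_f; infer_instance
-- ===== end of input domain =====

-- B replaces A's materialized counts list plus a second scan (recomputing max() at each step) by one online argmax pass: simpler.

-- ===== PORT A =====
-- A's second loop: for i in range(len(liczby)): if liczby[i]==max(liczby): return i
-- (every index i is in range, so comparing the two Options is exactly Python's value comparison)
def fGo (liczby : List Int) : List Int → Option Int
  | [] => none
  | i :: rest =>
    if PySem.List.pyGet? liczby i = PySem.List.max? liczby (fun y => y) then some i
    else fGo liczby rest

def f (dice : String) : Option Int :=
  let liczby : List Int :=
    (PySem.List.pyRange 0 (PySem.Str.len dice) 1).foldl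
      (fun acc i => acc ++ [((PySem.Str.count dice (PySem.Int.toStr i) : Int))]) []
  fGo liczby (PySem.List.pyRange 0 (PySem.List.len liczby) 1)

-- ===== PORT B =====
def f_alt (dice : String) : Option Int :=
  ((PySem.List.pyRange 0 (PySem.Str.len dice) 1).foldl
    (fun s i =>
      let c : Int := (PySem.Str.count dice (PySem.Int.toStr i) : Int)
      if s.1 = none ∨ s.2 < c then (some i, c) else s)
    (none, 0)).1

-- ===== PRECONDITION & SPEC =====
def Spec_f (dice : String) (out : Option Int) : Prop := out = f_alt dice
instance (dice : String) (out : Option Int) : Decidable (Spec_f dice out) := by unfold Spec_f; infer_instance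

-- ===== CLAIM (what is proved, stated in full; the proofs are below) =====
def Claim_equal_f : Prop := ∀ (dice : String), Dom_f dice → Spec_f dice (f dice)

-- ===== LEMMAS AND PROOFS =====

-- A's search loop returns the first index (from a on) whose entry equals the maximum.
theorem fGo_spec (L : List Int) (M : Int)
    (hM : PySem.List.max? L (fun y => y) = some M) :
    ∀ (k : Nat) (a : Int), 0 ≤ a → L.length - a.toNat = k → M ∈ L.drop a.toNat →
    fGo L (PySem.List.pyRange a (L.length : Int) 1) =
      some (a + ((L.drop a.toNat).findIdx (fun x => x == M) : Int)) := by
  intro k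
  induction k with
  | zero =>
    intro a _ hk hmem
    have : L.drop a.toNat = [] := List.drop_eq_nil_iff.mpr (by omega)
    rw [this] at hmem; simp at hmem
  | succ k ih =>
    intro a ha hk hmem
    have hlt : a.toNat < L.length := by omega
    have haI : a < (L.length : Int) := by omega
    rw [PySem.List.pyRange_one_cons haI]
    have hget : PySem.List.pyGet? L a = some L[a.toNat] := by
      have := PySem.List.pyGet?_natCast L a.toNat
      rw [Int.toNat_of_nonneg ha] at this
      rw [this, List.getElem?_eq_getElem hlt]
    have hdrop : L.drop a.toNat = L[a.toNat] :: L.drop (a.toNat + 1) :=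
      List.drop_eq_getElem_cons hlt
    by_cases heq : L[a.toNat] = M
    · simp only [fGo, hget, hM, heq]
      rw [hdrop, List.findIdx_cons]
      simp [heq]
    · have hcond : ¬ (PySem.List.pyGet? L a = PySem.List.max? L (fun y => y)) := by
        rw [hget, hM]; simp [heq]
      simp only [fGo, if_neg hcond]
      have ha1 : ((a + 1).toNat) = a.toNat + 1 := by omega
      have hmem' : M ∈ L.drop (a.toNat + 1) := by
        rw [hdrop] at hmem
        rcases List.mem_cons.mp hmem with h | h
        · exact absurd h.symm heq
        · exact h
      have := ih (a + 1) (by omega) (by omega) (by rw [ha1]; exact hmem')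
      rw [ha1] at this
      rw [this, hdrop, List.findIdx_cons]
      have : (L[a.toNat] == M) = false := by simp [heq]
      simp [this]
      ring

-- B's loop, once best_index is set, is this plain structural recursion on the remaining counts.
def bwin : List Int → Int → Int → Int → Int
  | [], _, j, _ => j
  | c :: t, i0, j, m => if m < c then bwin t (i0 + 1) i0 c else bwin t (i0 + 1) j m

theorem bwin_eq (t : List Int) : ∀ (i0 j m : Int),
    bwin t i0 j m =
      if t.foldl max m ≤ m then j
      else i0 + (t.findIdx (fun x => x == t.foldl max m) : Int) := by
  induction t with
  | nil => intro i0 j m; simp [bwin]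
  | cons c t' ih =>
    intro i0 j m
    simp only [bwin, List.foldl_cons]
    by_cases hmc : m < c
    · rw [if_pos hmc, ih]
      have hmax : max m c = c := by omega
      rw [hmax]
      have hcM : c ≤ t'.foldl max c := (PySem.List.le_foldl_max t' c).1
      by_cases hMc : t'.foldl max c ≤ c
      · have : t'.foldl max c = c := le_antisymm hMc hcM
        rw [if_pos hMc, if_neg (by omega), this, List.findIdx_cons]
        simp
      · rw [if_neg hMc, if_neg (by omega), List.findIdx_cons]
        have : (c == t'.foldl max c) = false := by simp; omega
        simp [this]
        ring
    · rw [if_neg hmc, ih]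
      have hmax : max m c = m := by omega
      rw [hmax]
      by_cases hMm : t'.foldl max m ≤ m
      · rw [if_pos hMm, if_pos hMm]
      · rw [if_neg hMm, if_neg hMm, List.findIdx_cons]
        have hm : m ≤ t'.foldl max m := (PySem.List.le_foldl_max t' m).1
        have : (c == t'.foldl max m) = false := by simp; omega
        simp [this]
        ring

theorem bfold (g : Int → Int) :
    ∀ (k : Nat) (a b : Int), (b - a).toNat = k → ∀ (j m : Int),
    (PySem.List.pyRange a b 1).foldl
      (fun s i => if s.1 = none ∨ s.2 < g i then (some i, g i) else s)
      ((some j : Option Int), m)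
    = (some (bwin ((PySem.List.pyRange a b 1).map g) a j m),
       ((PySem.List.pyRange a b 1).map g).foldl max m) := by
  intro k
  induction k with
  | zero =>
    intro a b hk j m
    rw [PySem.List.pyRange_one_eq_nil (by omega)]
    simp [bwin]
  | succ k ih =>
    intro a b hk j m
    have hab : a < b := by omega
    rw [PySem.List.pyRange_one_cons hab]
    simp only [List.foldl_cons, List.map_cons, bwin]
    by_cases h : m < g a
    · rw [if_pos (Or.inr h), if_pos h]
      have := ih (a + 1) b (by omega) a (g a)
      rw [this]
      have : max m (g a) = g a := by omega
      rw [this]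
    · have hc : ¬ ((some j : Option Int) = none ∨ m < g a) := by
        simp [h]
      rw [if_neg hc, if_neg h]
      have := ih (a + 1) b (by omega) j m
      rw [this]
      have : max m (g a) = m := by omega
      rw [this]

theorem final_step (c0 : Int) (t : List Int) :
    (0 : Int) + (((c0 :: t).findIdx (fun x => x == t.foldl max c0) : Nat) : Int)
      = if t.foldl max c0 ≤ c0 then 0
        else 1 + ((t.findIdx (fun x => x == t.foldl max c0) : Nat) : Int) := by
  by_cases h : t.foldl max c0 ≤ c0
  · have he : t.foldl max c0 = c0 := le_antisymm h (PySem.List.le_foldl_max t c0).1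
    rw [if_pos h, List.findIdx_cons, he]
    simp
  · rw [if_neg h, List.findIdx_cons]
    have hne : (c0 == t.foldl max c0) = false := by
      have := (PySem.List.le_foldl_max t c0).1
      simp; omega
    rw [hne]
    simp only [cond_false]
    push_cast
    ring

theorem f_spec' (dice : String) : f dice = f_alt dice := by
  simp only [f, f_alt, PySem.List.foldl_append_singleton_eq_map, List.nil_append]
  by_cases hpos : 0 < PySem.Str.len dice
  · rw [PySem.List.pyRange_one_cons hpos]
    simp only [List.map_cons, List.foldl_cons, zero_add]
    rw [if_pos (Or.inl trivial)]
    have hB := bfold (fun i => (PySem.Str.count dice (PySem.Int.toStr i) : Int))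
      (PySem.Str.len dice - 1).toNat 1 (PySem.Str.len dice) (by omega)
      0 ((PySem.Str.count dice (PySem.Int.toStr 0) : Int))
    rw [hB]
    have hM := PySem.List.max?_id_cons
      ((PySem.Str.count dice (PySem.Int.toStr 0) : Int))
      ((PySem.List.pyRange 1 (PySem.Str.len dice) 1).map
        (fun i => (PySem.Str.count dice (PySem.Int.toStr i) : Int)))
    have hA := fGo_spec _ _ hM _ 0 le_rfl rfl
      (by simpa using PySem.List.max?_mem hM)
    simp only [PySem.List.len_eq]
    rw [hA, bwin_eq]
    simp only [Int.toNat_zero, List.drop_zero]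
    exact congrArg some (final_step _ _)
  · rw [PySem.List.pyRange_one_eq_nil (by omega)]
    simp [fGo, PySem.List.pyRange_one_eq_nil]

-- ===== VERDICT (by name: the statement is the Claim_ definition above) =====
theorem f_spec : Claim_equal_f := by
  intro dice _
  unfold Spec_f
  exact f_spec' dice
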